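-- pv_equiv track=rewrite | github.com/jrodriguezgar/FormuLite | shortfx/fxNumeric/number_theory_functions.py | schroeder_number
-- ===== SOURCE A (Python) =====
-- def schroeder_number(n: int) -> int:
--     """Return the *n*-th large Schröder number.
--
--     Schröder numbers count the number of lattice paths from
--     (0,0) to (n,n) that do not go above the diagonal, using
--     steps (1,0), (0,1), and (1,1).
--
--     Recurrence: S(n) = ((6n − 3) · S(n−1) − (n − 2) · S(n−2)) / (n + 1),
--     with S(0) = 1, S(1) = 2.
--
--     Args:
--         n: Non-negative index.
--
--     Returns:
--         The *n*-th large Schröder number.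
--
--     Raises:
--         TypeError: If n is not an integer.
--         ValueError: If n is negative.
--
--     Example:
--         >>> schroeder_number(4)
--         90
--
--     Complexity: O(n)
--     """
--     if not isinstance(n, int):
--         raise TypeError("n must be an integer.")
--
--     if n < 0:
--         raise ValueError("n must be non-negative.")
--
--     if n == 0:
--         return 1
--
--     if n == 1:
--         return 2
--
--     a, b = 1, 2
--
--     for i in range(2, n + 1):
--         a, b = b, ((6 * i - 3) * b - (i - 2) * a) // (i + 1)
--
--     return b
-- ===== SOURCE B (Python) =====
-- def schroeder_number(n: int) -> int:
--     """Return the n-th large Schröder number via the Narayana-number summation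
--     (S(n)·n is the sum over k of C(n,k)·C(n,k-1)·2^k), folded in half with the
--     symmetry C(n,k)·C(n,k-1) = C(n,n+1-k)·C(n,n-k), the term numerators being
--     updated by exact integer ratios."""
--     if not isinstance(n, int):
--         raise TypeError("n must be an integer.")
--
--     if n < 0:
--         raise ValueError("n must be non-negative.")
--
--     if n == 0:
--         return 1
--
--     total = 0
--     t = n  # C(n,1) * C(n,0)
--     for k in range(1, (n + 1) // 2 + 1):
--         if 2 * k == n + 1:
--             total += t << k  # middle term (n odd)
--         else:
--             total += (t << k) + (t << (n + 1 - k))  # term k and its mirror n+1-k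
--         t = t * (n - k) * (n - k + 1) // (k * (k + 1))  # next numerator; exact division
--
--     return total // n  # exact: n divides the sum
-- ===== Notes on version B (the rewrite author's own statement) =====
-- stated objective: alternative
-- what changed: Replaces the three-term divided recurrence by the Narayana-number summation for the large Schroeder numbers, folded in half via the symmetry of the Narayana numbers, with each term numerator maintained by an exact integer ratio update instead of threading two-term recurrence state.
import Mathlib
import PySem

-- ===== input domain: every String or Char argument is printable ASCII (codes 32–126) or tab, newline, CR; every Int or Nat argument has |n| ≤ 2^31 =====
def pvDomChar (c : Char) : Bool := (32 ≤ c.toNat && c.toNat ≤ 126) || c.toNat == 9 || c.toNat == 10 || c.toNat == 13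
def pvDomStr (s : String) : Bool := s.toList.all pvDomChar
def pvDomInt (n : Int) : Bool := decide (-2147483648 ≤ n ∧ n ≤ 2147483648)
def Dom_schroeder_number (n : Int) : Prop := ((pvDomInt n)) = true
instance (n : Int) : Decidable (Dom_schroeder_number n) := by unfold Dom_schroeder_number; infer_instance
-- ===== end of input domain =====

-- B replaces the three-term divided recurrence by the Narayana-number summation for the
-- large Schröder numbers, folded in half via its symmetry, with the term numerators
-- maintained by exact integer ratio updates (objective: alternative).

-- ===== PORT A =====
def schroeder_number (n : Int) : Int :=
  if n < 0 then 0          -- Python raises ValueError here; excluded by Pre_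
  else if n = 0 then 1
  else if n = 1 then 2
  else
    ((PySem.List.pyRange 2 (n + 1) 1).foldl
      (fun (ab : Int × Int) i =>
        (ab.2, PySem.Int.floordiv ((6 * i - 3) * ab.2 - (i - 2) * ab.1) (i + 1)))
      (1, 2)).2

-- ===== PORT B =====
def schroeder_number_alt (n : Int) : Int :=
  if n < 0 then 0          -- Python raises ValueError here; excluded by Pre_
  else if n = 0 then 1
  else
    PySem.Int.floordiv
      (((PySem.List.pyRange 1 (PySem.Int.floordiv (n + 1) 2 + 1) 1).foldl
        (fun (tt : Int × Int) k =>
          -- `t << k` is exactly `t * 2 ^ k` for k ≥ 0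
          (if 2 * k = n + 1 then tt.1 + tt.2 * 2 ^ k.toNat
            else tt.1 + (tt.2 * 2 ^ k.toNat + tt.2 * 2 ^ (n + 1 - k).toNat),
           PySem.Int.floordiv (tt.2 * (n - k) * (n - k + 1)) (k * (k + 1))))
        (0, n)).1) n

-- ===== PRECONDITION & SPEC =====
-- Pre_ excludes exactly the negative n, on which the Python A raises ValueError.
def Pre_schroeder_number (n : Int) : Prop := 0 ≤ n
instance (n : Int) : Decidable (Pre_schroeder_number n) := by unfold Pre_schroeder_number; infer_instance
def pvWitness_schroeder_number : Int := 4

def Spec_schroeder_number (n : Int) (out : Int) : Prop := out = schroeder_number_alt n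
instance (n : Int) (out : Int) : Decidable (Spec_schroeder_number n out) := by unfold Spec_schroeder_number; infer_instance

-- ===== CLAIM (what is proved, stated in full; the proofs are below) =====
def Claim_equal_schroeder_number : Prop := ∀ (n : Int), Dom_schroeder_number n → Pre_schroeder_number n → Spec_schroeder_number n (schroeder_number n)

-- ===== LEMMAS AND PROOFS =====

-- casts of binomial coefficients into ℚ
def chQ (a b : ℕ) : ℚ := (a.choose b : ℚ)

-- the telescoping certificate term (Zeilberger certificate for the Narayana sum)
def Tq (m j : ℕ) : ℚ :=
  ((j : ℚ) + 1) * (j : ℚ) *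
    (2 * ((m : ℚ) + 3) ^ 2 - 3 * ((m : ℚ) + 3) - ((j : ℚ) + 1) ^ 2 + 3 * ((j : ℚ) + 1) - 1) *
    chQ (m + 3) (j + 1) * chQ (m + 3) j

-- B's running total, as a ℤ-valued partial sum, and its ℚ shadow
def TZ (n j : ℕ) : ℤ := ∑ i ∈ Finset.range j, (n.choose (i + 1) : ℤ) * (n.choose i) * 2 ^ (i + 1)
def HZ (N j : ℕ) : ℤ :=
  ∑ i ∈ Finset.range j,
    (if 2 * (i + 1) = N + 1 then (N.choose (i + 1) : ℤ) * (N.choose i) * 2 ^ (i + 1)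
      else (N.choose (i + 1) : ℤ) * (N.choose i) * 2 ^ (i + 1)
        + (N.choose (i + 1) : ℤ) * (N.choose i) * 2 ^ (N - i))

def Urat (n : ℕ) : ℚ := ∑ i ∈ Finset.range n, (n.choose (i + 1) : ℚ) * (n.choose i) * 2 ^ (i + 1)

-- the exact rational recurrence of A
def Srat : ℕ → ℚ
  | 0 => 1
  | 1 => 2
  | n + 2 => ((6 * (n : ℚ) + 9) * Srat (n + 1) - (n : ℚ) * Srat n) / ((n : ℚ) + 3)

lemma SratE (n : ℕ) :
    Srat (n + 2) = ((6 * (n : ℚ) + 9) * Srat (n + 1) - (n : ℚ) * Srat n) / ((n : ℚ) + 3) := by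
  rw [Srat]

lemma TZ_cast (n j : ℕ) : ((TZ n j : ℤ) : ℚ) = ∑ i ∈ Finset.range j, (n.choose (i + 1) : ℚ) * (n.choose i) * 2 ^ (i + 1) := by
  unfold TZ; push_cast; ring

lemma choose_ratio (M j : ℕ) :
    ((j : ℚ) + 1) * chQ M (j + 1) = ((M : ℚ) - (j : ℚ)) * chQ M j := by
  unfold chQ
  rcases Nat.lt_or_ge M j with h | h
  · have h1 : M.choose (j + 1) = 0 := Nat.choose_eq_zero_of_lt (by omega)
    have h2 : M.choose j = 0 := Nat.choose_eq_zero_of_lt h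
    simp [h1, h2]
  · have h2 := congrArg (Nat.cast (R := ℚ)) (Nat.choose_succ_right_eq M j)
    push_cast [Nat.cast_sub h] at h2
    linarith

lemma pascal2 (a b : ℕ) :
    (a + 2).choose (b + 2) = a.choose b + 2 * (a.choose (b + 1)) + a.choose (b + 2) := by
  rw [show a + 2 = (a + 1) + 1 from rfl, show b + 2 = (b + 1) + 1 from rfl,
    Nat.choose_succ_succ, Nat.choose_succ_succ, Nat.choose_succ_succ]
  ring

-- the pointwise (telescoped) identity, main case j = i + 2
lemma key_main (m i : ℕ) :
    ((m : ℚ) + 3) * ((m : ℚ) + 2) *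
      (((m : ℚ) + 4) * ((m : ℚ) + 2) * chQ (m + 3) (i + 3) * chQ (m + 3) (i + 2)
        - ((m : ℚ) + 3) * (6 * (m : ℚ) + 15) * chQ (m + 2) (i + 3) * chQ (m + 2) (i + 2)
        + ((m : ℚ) + 3) * ((m : ℚ) + 2) * chQ (m + 1) (i + 3) * chQ (m + 1) (i + 2))
    = Tq m (i + 2) - 2 * Tq m (i + 3) := by
  have pA3 : chQ (m + 3) (i + 3) = chQ (m + 1) (i + 1) + 2 * chQ (m + 1) (i + 2) + chQ (m + 1) (i + 3) := by
    unfold chQ; exact_mod_cast congrArg (Nat.cast (R := ℚ)) (pascal2 (m + 1) (i + 1))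
  have pA2 : chQ (m + 3) (i + 2) = chQ (m + 1) i + 2 * chQ (m + 1) (i + 1) + chQ (m + 1) (i + 2) := by
    unfold chQ; exact_mod_cast congrArg (Nat.cast (R := ℚ)) (pascal2 (m + 1) i)
  have pA4 : chQ (m + 3) (i + 4) = chQ (m + 1) (i + 2) + 2 * chQ (m + 1) (i + 3) + chQ (m + 1) (i + 4) := by
    unfold chQ; exact_mod_cast congrArg (Nat.cast (R := ℚ)) (pascal2 (m + 1) (i + 2))
  have pB3 : chQ (m + 2) (i + 3) = chQ (m + 1) (i + 2) + chQ (m + 1) (i + 3) := by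
    unfold chQ; exact_mod_cast congrArg (Nat.cast (R := ℚ)) (Nat.choose_succ_succ (m + 1) (i + 2))
  have pB2 : chQ (m + 2) (i + 2) = chQ (m + 1) (i + 1) + chQ (m + 1) (i + 2) := by
    unfold chQ; exact_mod_cast congrArg (Nat.cast (R := ℚ)) (Nat.choose_succ_succ (m + 1) (i + 1))
  have r1 := choose_ratio (m + 1) i
  have r2 := choose_ratio (m + 1) (i + 1)
  have r3 := choose_ratio (m + 1) (i + 2)
  have r4 := choose_ratio (m + 1) (i + 3)
  push_cast at r1 r2 r3 r4
  have hx1 : chQ (m + 1) (i + 1) = ((m : ℚ) + 1 - (i : ℚ)) * chQ (m + 1) i / ((i : ℚ) + 1) := by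
    rw [eq_div_iff (by positivity)]; linarith
  have hx2 : chQ (m + 1) (i + 2) = ((m : ℚ) - (i : ℚ)) * chQ (m + 1) (i + 1) / ((i : ℚ) + 2) := by
    rw [eq_div_iff (by positivity)]; linarith
  have hx3 : chQ (m + 1) (i + 3) = ((m : ℚ) - 1 - (i : ℚ)) * chQ (m + 1) (i + 2) / ((i : ℚ) + 3) := by
    rw [eq_div_iff (by positivity)]; linarith
  have hx4 : chQ (m + 1) (i + 4) = ((m : ℚ) - 2 - (i : ℚ)) * chQ (m + 1) (i + 3) / ((i : ℚ) + 4) := by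
    rw [eq_div_iff (by positivity)]; linarith
  unfold Tq
  rw [pA3, pA2, pA4, pB3, pB2, hx4, hx3, hx2, hx1]
  push_cast
  field_simp
  ring

-- the pointwise identity, all j
lemma key (m j : ℕ) :
    ((m : ℚ) + 3) * ((m : ℚ) + 2) *
      (((m : ℚ) + 4) * ((m : ℚ) + 2) * chQ (m + 3) (j + 1) * chQ (m + 3) j
        - ((m : ℚ) + 3) * (6 * (m : ℚ) + 15) * chQ (m + 2) (j + 1) * chQ (m + 2) j
        + ((m : ℚ) + 3) * ((m : ℚ) + 2) * chQ (m + 1) (j + 1) * chQ (m + 1) j)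
    = Tq m j - 2 * Tq m (j + 1) := by
  have hr2 := choose_ratio (m + 1) 1
  have hr3 := choose_ratio (m + 1) 2
  push_cast at hr2 hr3
  have hc2 : chQ (m + 1) 2 = (m : ℚ) * ((m : ℚ) + 1) / 2 := by
    rw [eq_div_iff (by norm_num)]
    have h1 : chQ (m + 1) 1 = (m : ℚ) + 1 := by unfold chQ; push_cast [Nat.choose_one_right]; ring
    rw [h1] at hr2; linarith
  have hc3 : chQ (m + 1) 3 = ((m : ℚ) - 1) * chQ (m + 1) 2 / 3 := by
    rw [eq_div_iff (by norm_num)]; linarith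
  match j with
  | 0 =>
    have pA2' : chQ (m + 3) 2 = chQ (m + 1) 0 + 2 * chQ (m + 1) 1 + chQ (m + 1) 2 := by
      unfold chQ; exact_mod_cast congrArg (Nat.cast (R := ℚ)) (pascal2 (m + 1) 0)
    unfold Tq
    simp only [pA2', hc2]
    unfold chQ
    push_cast [Nat.choose_one_right, Nat.choose_zero_right]
    ring
  | 1 =>
    have pA3' : chQ (m + 3) 3 = chQ (m + 1) 1 + 2 * chQ (m + 1) 2 + chQ (m + 1) 3 := by
      unfold chQ; exact_mod_cast congrArg (Nat.cast (R := ℚ)) (pascal2 (m + 1) 1)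
    have pA2' : chQ (m + 3) 2 = chQ (m + 1) 0 + 2 * chQ (m + 1) 1 + chQ (m + 1) 2 := by
      unfold chQ; exact_mod_cast congrArg (Nat.cast (R := ℚ)) (pascal2 (m + 1) 0)
    have pB2' : chQ (m + 2) 2 = chQ (m + 1) 1 + chQ (m + 1) 2 := by
      unfold chQ; exact_mod_cast congrArg (Nat.cast (R := ℚ)) (Nat.choose_succ_succ (m + 1) 1)
    unfold Tq
    simp only [pA3', pA2', pB2', hc3, hc2]
    unfold chQ
    push_cast [Nat.choose_one_right, Nat.choose_zero_right]
    field_simp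
    ring
  | (i + 2) =>
    have h := key_main m i
    push_cast at h ⊢
    convert h using 2

-- sums of a shifted row are the same Urat (the extra terms vanish)
lemma Urat_ext (n k : ℕ) (h : n ≤ k) :
    ∑ j ∈ Finset.range k, (n.choose (j + 1) : ℚ) * (n.choose j) * 2 ^ (j + 1) = Urat n := by
  unfold Urat
  symm
  apply Finset.sum_subset
  · intro x hx
    simp only [Finset.mem_range] at hx ⊢
    omega
  · intro j _ hj
    have : n.choose (j + 1) = 0 := Nat.choose_eq_zero_of_lt (by simp at hj; omega)
    simp [this]

lemma sum_split (f g h : ℕ → ℚ) (c1 c2 c3 : ℚ) (N : ℕ) :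
    ∑ j ∈ Finset.range N, (c1 * f j - c2 * g j + c3 * h j)
      = c1 * ∑ j ∈ Finset.range N, f j - c2 * ∑ j ∈ Finset.range N, g j
        + c3 * ∑ j ∈ Finset.range N, h j := by
  rw [Finset.sum_add_distrib, Finset.sum_sub_distrib, ← Finset.mul_sum, ← Finset.mul_sum, ← Finset.mul_sum]

-- the three-term recurrence of the Narayana sums
lemma main (m : ℕ) :
    ((m : ℚ) + 4) * ((m : ℚ) + 2) * Urat (m + 3)
      = ((m : ℚ) + 3) * (6 * (m : ℚ) + 15) * Urat (m + 2)
        - ((m : ℚ) + 3) * ((m : ℚ) + 2) * Urat (m + 1) := by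
  have hne : (((m : ℚ) + 3) * ((m : ℚ) + 2)) ≠ 0 := by positivity
  have tele := Finset.sum_range_sub' (fun j => Tq m j * 2 ^ (j + 1)) (m + 3)
  have step : ∀ j ∈ Finset.range (m + 3),
      (((m : ℚ) + 3) * ((m : ℚ) + 2) * (((m : ℚ) + 4) * ((m : ℚ) + 2)) *
          (chQ (m + 3) (j + 1) * chQ (m + 3) j * 2 ^ (j + 1))
        - ((m : ℚ) + 3) * ((m : ℚ) + 2) * (((m : ℚ) + 3) * (6 * (m : ℚ) + 15)) *
          (chQ (m + 2) (j + 1) * chQ (m + 2) j * 2 ^ (j + 1))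
        + ((m : ℚ) + 3) * ((m : ℚ) + 2) * (((m : ℚ) + 3) * ((m : ℚ) + 2)) *
          (chQ (m + 1) (j + 1) * chQ (m + 1) j * 2 ^ (j + 1)))
      = (fun j => Tq m j * 2 ^ (j + 1)) j - (fun j => Tq m j * 2 ^ (j + 1)) (j + 1) := by
    intro j _
    simp only
    linear_combination (2 : ℚ) ^ (j + 1) * key m j
  have hsum := Finset.sum_congr rfl step
  rw [tele, sum_split] at hsum
  have e3 : ∑ j ∈ Finset.range (m + 3), chQ (m + 3) (j + 1) * chQ (m + 3) j * 2 ^ (j + 1)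
      = Urat (m + 3) := rfl
  have e2 : ∑ j ∈ Finset.range (m + 3), chQ (m + 2) (j + 1) * chQ (m + 2) j * 2 ^ (j + 1)
      = Urat (m + 2) := Urat_ext (m + 2) (m + 3) (by omega)
  have e1 : ∑ j ∈ Finset.range (m + 3), chQ (m + 1) (j + 1) * chQ (m + 1) j * 2 ^ (j + 1)
      = Urat (m + 1) := Urat_ext (m + 1) (m + 3) (by omega)
  rw [e3, e2, e1] at hsum
  have hT0 : Tq m 0 * 2 ^ (0 + 1) = 0 := by unfold Tq; push_cast; ring
  have hTend : Tq m (m + 3) * 2 ^ (m + 3 + 1) = 0 := by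
    unfold Tq chQ
    rw [Nat.choose_eq_zero_of_lt (show m + 3 < m + 3 + 1 by omega)]
    push_cast; ring
  rw [hT0, hTend] at hsum
  apply mul_left_cancel₀ hne
  linear_combination hsum

lemma U_eq : ∀ m : ℕ, Urat (m + 1) = ((m : ℚ) + 1) * Srat (m + 1) := by
  intro m
  induction m using Nat.strong_induction_on with
  | _ m ih =>
    match m, ih with
    | 0, _ =>
      norm_num [Urat, Srat, Finset.sum_range_succ]
    | 1, _ =>
      have h2 : Srat 2 = 6 := by
        rw [show (2 : ℕ) = 0 + 2 from rfl, SratE]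
        norm_num [Srat]
      norm_num [Urat, Finset.sum_range_succ, h2]
    | (i + 2), ih =>
      have h1 := ih (i + 1) (by omega)
      have h2 := ih i (by omega)
      have h3 := main i
      push_cast at h1 h2
      have hS : ((i : ℚ) + 4) * Srat (i + 3) = (6 * (i : ℚ) + 15) * Srat (i + 2)
          - ((i : ℚ) + 1) * Srat (i + 1) := by
        have h := SratE (i + 1)
        rw [eq_div_iff (by positivity)] at h
        push_cast at h
        linear_combination h
      have hne : (((i : ℚ) + 4) * ((i : ℚ) + 2)) ≠ 0 := by positivity
      push_cast
      apply mul_left_cancel₀ hne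
      linear_combination h3 + ((i : ℚ) + 3) * (6 * (i : ℚ) + 15) * h1
        - ((i : ℚ) + 3) * ((i : ℚ) + 2) * h2 - ((i : ℚ) + 3) * ((i : ℚ) + 2) * hS

lemma SZ_ex : ∀ m : ℕ, ∃ z : ℤ, (z : ℚ) = Srat m := by
  intro m
  induction m using Nat.strong_induction_on with
  | _ m ih =>
    match m, ih with
    | 0, _ => exact ⟨1, by norm_num [Srat]⟩
    | 1, _ => exact ⟨2, by norm_num [Srat]⟩
    | (i + 2), ih =>
      obtain ⟨z1, hz1⟩ := ih (i + 1) (by omega)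
      obtain ⟨z0, hz0⟩ := ih i (by omega)
      refine ⟨(6 * (i : ℤ) + 9) * z1 - (i : ℤ) * z0 - TZ (i + 2) (i + 2), ?_⟩
      have hU := U_eq (i + 1)
      push_cast at hU
      have hS : ((i : ℚ) + 3) * Srat (i + 2) = (6 * (i : ℚ) + 9) * Srat (i + 1)
          - (i : ℚ) * Srat i := by
        have h := SratE i
        rw [eq_div_iff (by positivity)] at h
        linear_combination h
      have hT : ((TZ (i + 2) (i + 2) : ℤ) : ℚ) = Urat (i + 2) := by rw [TZ_cast]; rfl
      simp only [show i + 1 + 1 = i + 2 from rfl] at hU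
      push_cast
      rw [hz1, hz0, hT, hU]
      linear_combination -hS

-- characterisation of A's loop
lemma foldA (m : ℕ) :
    ∃ a b : ℤ,
      ((PySem.List.pyRange 2 ((m : ℤ) + 3) 1).foldl
        (fun (ab : Int × Int) i =>
          (ab.2, PySem.Int.floordiv ((6 * i - 3) * ab.2 - (i - 2) * ab.1) (i + 1)))
        (1, 2)) = (a, b) ∧ (a : ℚ) = Srat (m + 1) ∧ (b : ℚ) = Srat (m + 2) := by
  induction m with
  | zero =>
    refine ⟨2, 6, ?_, ?_, ?_⟩
    · rw [show ((0 : ℕ) : ℤ) + 3 = 3 by norm_num]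
      decide
    · norm_num [Srat]
    · have h2 : Srat 2 = 6 := by
        rw [show (2 : ℕ) = 0 + 2 from rfl, SratE]
        norm_num [Srat]
      rw [show (0 : ℕ) + 2 = 2 from rfl, h2]
      norm_num
  | succ m ihm =>
    obtain ⟨a, b, hfold, ha, hb⟩ := ihm
    obtain ⟨z, hzc⟩ := SZ_ex (m + 3)
    have hbound : ((m + 1 : ℕ) : ℤ) + 3 = ((m : ℤ) + 3) + 1 := by push_cast; ring
    rw [hbound, PySem.List.pyRange_one_succ_right (by omega : (2 : ℤ) ≤ (m : ℤ) + 3),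
      List.foldl_append, hfold]
    refine ⟨b, z, ?_, ?_, ?_⟩
    · simp only [List.foldl_cons, List.foldl_nil]
      have hnum : (6 * ((m : ℤ) + 3) - 3) * b - (((m : ℤ) + 3) - 2) * a = ((m : ℤ) + 4) * z := by
        have hq : (((6 * ((m : ℤ) + 3) - 3) * b - (((m : ℤ) + 3) - 2) * a : ℤ) : ℚ)
            = ((((m : ℤ) + 4) * z : ℤ) : ℚ) := by
          push_cast
          rw [ha, hb, hzc]
          have h := SratE (m + 1)
          rw [eq_div_iff (by positivity)] at h
          push_cast at h
          simp only [show m + 1 + 2 = m + 3 from rfl, show m + 1 + 1 = m + 2 from rfl] at h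
          linear_combination -h
        exact_mod_cast hq
      rw [hnum, show ((m : ℤ) + 3) + 1 = (m : ℤ) + 4 by ring,
        PySem.Int.floordiv_eq_ediv_of_pos (by positivity)]
      rw [Int.mul_ediv_cancel_left z (by positivity)]
    · exact hb
    · exact hzc

-- the half sum with mirrored terms is the full Narayana sum
lemma HZ_eq (N : ℕ) (hN : 1 ≤ N) : HZ N ((N + 1) / 2) = TZ N N := by
  have hsplit : (∑ i ∈ Finset.range ((N + 1) / 2), (N.choose (i + 1) : ℤ) * (N.choose i) * 2 ^ (i + 1))
        + (∑ i ∈ Finset.range (N - (N + 1) / 2),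
            (N.choose ((N + 1) / 2 + i + 1) : ℤ) * (N.choose ((N + 1) / 2 + i)) * 2 ^ ((N + 1) / 2 + i + 1))
      = TZ N N := by
    rw [← Finset.sum_range_add, show (N + 1) / 2 + (N - (N + 1) / 2) = N from by omega]
    rfl
  have hrefl : (∑ i ∈ Finset.range (N - (N + 1) / 2),
        (N.choose ((N + 1) / 2 + i + 1) : ℤ) * (N.choose ((N + 1) / 2 + i)) * 2 ^ ((N + 1) / 2 + i + 1))
      = ∑ i ∈ Finset.range (N - (N + 1) / 2),
          (N.choose (i + 1) : ℤ) * (N.choose i) * 2 ^ (N - i) := by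
    rw [(Finset.sum_range_reflect
      (fun i => (N.choose ((N + 1) / 2 + i + 1) : ℤ) * (N.choose ((N + 1) / 2 + i)) * 2 ^ ((N + 1) / 2 + i + 1))
      (N - (N + 1) / 2)).symm]
    apply Finset.sum_congr rfl
    intro i hi
    simp only [Finset.mem_range] at hi
    rw [show (N + 1) / 2 + (N - (N + 1) / 2 - 1 - i) + 1 = N - i from by omega,
      show (N + 1) / 2 + (N - (N + 1) / 2 - 1 - i) = N - (i + 1) from by omega,
      Nat.choose_symm (show i ≤ N from by omega),
      Nat.choose_symm (show i + 1 ≤ N from by omega)]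
    ring
  rw [← hsplit, hrefl]
  rcases Nat.even_or_odd N with ⟨w, hw⟩ | ⟨w, hw⟩
  · have hlen : N - (N + 1) / 2 = (N + 1) / 2 := by omega
    unfold HZ
    rw [hlen, ← Finset.sum_add_distrib]
    refine Finset.sum_congr rfl fun i _ => ?_
    rw [if_neg (by omega)]
  · obtain ⟨p, hp⟩ : ∃ p, (N + 1) / 2 = p + 1 := ⟨(N + 1) / 2 - 1, by omega⟩
    rw [hp, show N - (p + 1) = p from by omega]
    unfold HZ
    rw [Finset.sum_range_succ, Finset.sum_range_succ,
      if_pos (show 2 * (p + 1) = N + 1 from by omega)]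
    have hc : (∑ x ∈ Finset.range p,
          (if 2 * (x + 1) = N + 1 then (N.choose (x + 1) : ℤ) * (N.choose x) * 2 ^ (x + 1)
            else (N.choose (x + 1) : ℤ) * (N.choose x) * 2 ^ (x + 1)
              + (N.choose (x + 1) : ℤ) * (N.choose x) * 2 ^ (N - x)))
        = ∑ x ∈ Finset.range p,
            ((N.choose (x + 1) : ℤ) * (N.choose x) * 2 ^ (x + 1)
              + (N.choose (x + 1) : ℤ) * (N.choose x) * 2 ^ (N - x)) := by
      refine Finset.sum_congr rfl fun i hi => ?_
      simp only [Finset.mem_range] at hi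
      rw [if_neg (show ¬(2 * (i + 1) = N + 1) from by omega)]
    rw [hc, Finset.sum_add_distrib]
    ring

-- characterisation of B's loop
lemma foldB (N : ℕ) : ∀ j : ℕ, j ≤ (N + 1) / 2 →
    ((PySem.List.pyRange 1 ((j : ℤ) + 1) 1).foldl
      (fun (tt : Int × Int) k =>
        (if 2 * k = ((N : ℕ) : ℤ) + 1 then tt.1 + tt.2 * 2 ^ k.toNat
          else tt.1 + (tt.2 * 2 ^ k.toNat + tt.2 * 2 ^ (((N : ℕ) : ℤ) + 1 - k).toNat),
         PySem.Int.floordiv (tt.2 * (((N : ℕ) : ℤ) - k) * (((N : ℕ) : ℤ) - k + 1)) (k * (k + 1))))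
      (0, ((N : ℕ) : ℤ))) = (HZ N j, (N.choose (j + 1) : ℤ) * (N.choose j)) := by
  intro j
  induction j with
  | zero =>
    intro _
    rw [show ((0 : ℕ) : ℤ) + 1 = 1 by norm_num,
      PySem.List.pyRange_one_eq_nil (le_refl (1 : ℤ))]
    simp [HZ]
  | succ j ihj =>
    intro hj
    have hj2 : j + 1 ≤ N := by omega
    have hbound : ((j + 1 : ℕ) : ℤ) + 1 = ((j : ℤ) + 1) + 1 := by push_cast; ring
    rw [hbound, PySem.List.pyRange_one_succ_right (by omega : (1 : ℤ) ≤ (j : ℤ) + 1),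
      List.foldl_append, ihj (by omega)]
    simp only [List.foldl_cons, List.foldl_nil]
    have e1 := congrArg (Nat.cast (R := ℤ)) (Nat.choose_succ_right_eq N j)
    push_cast [Nat.cast_sub (by omega : j ≤ N)] at e1
    have e2 := congrArg (Nat.cast (R := ℤ)) (Nat.choose_succ_right_eq N (j + 1))
    push_cast [Nat.cast_sub hj2] at e2
    have hdiv : (N.choose (j + 1) : ℤ) * (N.choose j) * (((N : ℕ) : ℤ) - ((j : ℤ) + 1))
          * (((N : ℕ) : ℤ) - ((j : ℤ) + 1) + 1)
        = (((j : ℤ) + 1) * (((j : ℤ) + 1) + 1)) * ((N.choose (j + 2) : ℤ) * (N.choose (j + 1))) := by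
      linear_combination (-((N : ℤ) - (j : ℤ) - 1) * (N.choose (j + 1) : ℤ)) * e1
        - (((j : ℤ) + 1) * (N.choose (j + 1) : ℤ)) * e2
    have hfd : PySem.Int.floordiv
          ((N.choose (j + 1) : ℤ) * (N.choose j) * (((N : ℕ) : ℤ) - ((j : ℤ) + 1))
            * (((N : ℕ) : ℤ) - ((j : ℤ) + 1) + 1)) (((j : ℤ) + 1) * (((j : ℤ) + 1) + 1))
        = (N.choose (j + 2) : ℤ) * (N.choose (j + 1)) := by
      rw [hdiv, PySem.Int.floordiv_eq_ediv_of_pos (by positivity)]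
      exact Int.mul_ediv_cancel_left _ (by positivity)
    have htn : ((j : ℤ) + 1).toNat = j + 1 := by omega
    have htn2 : (((N : ℕ) : ℤ) + 1 - ((j : ℤ) + 1)).toNat = N - j := by omega
    have hHZ : HZ N (j + 1) = HZ N j
        + (if 2 * (j + 1) = N + 1 then (N.choose (j + 1) : ℤ) * (N.choose j) * 2 ^ (j + 1)
            else (N.choose (j + 1) : ℤ) * (N.choose j) * 2 ^ (j + 1)
              + (N.choose (j + 1) : ℤ) * (N.choose j) * 2 ^ (N - j)) := by
      unfold HZ
      rw [Finset.sum_range_succ]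
    rw [hfd, htn, htn2, hHZ]
    simp only [show j + 1 + 1 = j + 2 from rfl]
    by_cases hmid : 2 * (j + 1) = N + 1
    · rw [if_pos (show 2 * ((j : ℤ) + 1) = ((N : ℕ) : ℤ) + 1 from by omega), if_pos hmid]
    · rw [if_neg (show ¬(2 * ((j : ℤ) + 1) = ((N : ℕ) : ℤ) + 1) from by omega), if_neg hmid]

-- ===== VERDICT (by name: the statement is the Claim_ definition above) =====
set_option maxRecDepth 8000 in
theorem schroeder_number_spec : Claim_equal_schroeder_number := by
  intro n hdom hpre
  unfold Spec_schroeder_number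
  unfold Pre_schroeder_number at hpre
  obtain ⟨m, rfl⟩ : ∃ m : ℕ, n = (m : ℤ) := ⟨n.toNat, (Int.toNat_of_nonneg hpre).symm⟩
  rcases Nat.lt_or_ge m 2 with hm | hm
  · interval_cases m
    · decide
    · decide
  · obtain ⟨j, rfl⟩ : ∃ j : ℕ, m = j + 2 := ⟨m - 2, by omega⟩
    obtain ⟨a, b, hfold, ha, hb⟩ := foldA j
    obtain ⟨z, hz⟩ := SZ_ex (j + 2)
    have hbz : b = z := by
      have hq : (b : ℚ) = (z : ℚ) := by rw [hb, hz]
      exact_mod_cast hq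
    have hc0 : ¬(((j + 2 : ℕ) : ℤ) < 0) := by omega
    have hc1 : ¬(((j + 2 : ℕ) : ℤ) = 0) := by omega
    have hc2 : ¬(((j + 2 : ℕ) : ℤ) = 1) := by omega
    have hA : schroeder_number ((j + 2 : ℕ) : ℤ) = b := by
      unfold schroeder_number
      rw [if_neg hc0, if_neg hc1, if_neg hc2,
        show ((j + 2 : ℕ) : ℤ) + 1 = (j : ℤ) + 3 by push_cast; ring, hfold]
    have hU := U_eq (j + 1)
    push_cast at hU
    have hTZ : TZ (j + 2) (j + 2) = ((j + 2 : ℕ) : ℤ) * z := by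
      have hq : ((TZ (j + 2) (j + 2) : ℤ) : ℚ) = ((((j + 2 : ℕ) : ℤ) * z : ℤ) : ℚ) := by
        rw [TZ_cast]
        have hUr : (∑ i ∈ Finset.range (j + 2),
            ((j + 2).choose (i + 1) : ℚ) * ((j + 2).choose i) * 2 ^ (i + 1)) = Urat (j + 2) := rfl
        rw [hUr, hU, ← hz]
        push_cast
        ring
      exact_mod_cast hq
    have hB : schroeder_number_alt ((j + 2 : ℕ) : ℤ) = z := by
      unfold schroeder_number_alt
      rw [if_neg hc0, if_neg hc1]
      rw [show PySem.Int.floordiv (((j + 2 : ℕ) : ℤ) + 1) 2 = (((j + 3) / 2 : ℕ) : ℤ) from by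
        rw [show (((j + 2 : ℕ) : ℤ) + 1) = ((j + 3 : ℕ) : ℤ) from by push_cast; ring]
        exact_mod_cast PySem.Int.floordiv_natCast (j + 3) 2]
      rw [foldB (j + 2) ((j + 3) / 2) (by omega)]
      simp only
      rw [HZ_eq (j + 2) (by omega), hTZ,
        PySem.Int.floordiv_eq_ediv_of_pos (by omega), Int.mul_ediv_cancel_left z (by omega)]
    rw [hA, hB, hbz]
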